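-- pv_equiv track=rewrite | github.com/bavocadob/problem-solving | 2025/BOJ/python/20756.py | sieve_h_primes
-- ===== SOURCE A (Python) =====
-- def sieve_h_primes(limit):
--     is_h_composite = [False] * (limit + 1)
--
--     for i in range(5, int(limit ** 0.5) + 1):
--         if i % 4 != 1:
--             continue
--
--         for j in range(i, (limit // i) + 1):
--             if j % 4 != 1:
--                 continue
--
--             product = i * j
--             if product > limit:
--                 break
--             is_h_composite[product] = True
--
--     h_primes = []
--     for i in range(5, limit + 1, 4):
--         if not is_h_composite[i]:
--             h_primes.append(i)
--
--     return h_primes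
-- ===== SOURCE B (Python) =====
-- def sieve_h_primes(limit):
--     # Trial division: n (== 1 mod 4) is an H-prime iff no H-number divisor d with 5 <= d <= sqrt(n).
--     h_primes = []
--     for n in range(5, limit + 1, 4):
--         if all(n % d != 0 for d in range(5, int(n ** 0.5) + 1, 4)):
--             h_primes.append(n)
--     return h_primes
-- ===== Notes on version B (the rewrite author's own statement) =====
-- stated objective: simpler
-- what changed: Replaces A's two-phase product sieve (mark every i*j in a boolean array, then filter) by direct trial division: n is kept iff it has no divisor d with d % 4 == 1 and 5 <= d <= sqrt(n).
import Mathlib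
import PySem

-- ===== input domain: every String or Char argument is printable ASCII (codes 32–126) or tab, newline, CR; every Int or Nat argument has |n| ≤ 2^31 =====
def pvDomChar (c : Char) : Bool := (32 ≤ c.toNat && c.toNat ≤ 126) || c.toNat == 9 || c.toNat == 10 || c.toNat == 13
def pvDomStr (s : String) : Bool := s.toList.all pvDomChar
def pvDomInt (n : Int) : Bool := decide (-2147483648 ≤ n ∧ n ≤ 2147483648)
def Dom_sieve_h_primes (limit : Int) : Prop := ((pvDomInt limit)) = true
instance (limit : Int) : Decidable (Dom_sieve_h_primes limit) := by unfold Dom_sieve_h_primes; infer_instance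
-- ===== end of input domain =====

-- B replaces A's product sieve (mark i*j in an array, then filter) by direct trial division
-- per candidate (n is an H-prime iff no divisor d ≡ 1 mod 4 with 5 ≤ d ≤ √n); objective: simpler.


-- ===== PORT A =====
-- int(x ** 0.5): exact for 0 ≤ x ≤ 2^31 (the double sqrt is correctly rounded and the
-- rounding error cannot cross an integer there), ported as the integer square root.
def isqrtI (x : Int) : Int := (Nat.sqrt x.toNat : Int)

-- inner loop 'for j in range(i, limit//i + 1): …' with its continue and break
def innerA (limit i : Int) (js : List Int) (arr : List Bool) : List Bool :=
  match js with
  | [] => arr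
  | j :: rest =>
    if PySem.Int.mod j 4 ≠ 1 then innerA limit i rest arr
    else if i * j > limit then arr
    else innerA limit i rest (PySem.List.pySetD arr (i * j) true)

-- outer loop 'for i in range(5, int(limit**0.5) + 1): …' with its continue
def outerA (limit : Int) (is' : List Int) (arr : List Bool) : List Bool :=
  match is' with
  | [] => arr
  | i :: rest =>
    if PySem.Int.mod i 4 ≠ 1 then outerA limit rest arr
    else outerA limit rest
      (innerA limit i (PySem.List.pyRange i (PySem.Int.floordiv limit i + 1) 1) arr)

def sieve_h_primes (limit : Int) : List Int :=
  let arr := outerA limit (PySem.List.pyRange 5 (isqrtI limit + 1) 1)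
      (List.replicate (limit + 1).toNat false)
  (PySem.List.pyRange 5 (limit + 1) 4).foldl
    (fun acc i => if PySem.List.pyGetD arr i false then acc else acc ++ [i]) []

-- ===== PORT B =====
def sieve_h_primes_alt (limit : Int) : List Int :=
  (PySem.List.pyRange 5 (limit + 1) 4).foldl
    (fun acc n =>
      if (PySem.List.pyRange 5 (isqrtI n + 1) 4).all (fun d => PySem.Int.mod n d != 0)
      then acc ++ [n] else acc) []

-- ===== PRECONDITION & SPEC =====
-- On limit < 0 Python A raises TypeError (int() of the complex value (-limit)**0.5 · i).
def Pre_sieve_h_primes (limit : Int) : Prop := 0 ≤ limit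
instance (limit : Int) : Decidable (Pre_sieve_h_primes limit) := by
  unfold Pre_sieve_h_primes; infer_instance
def pvWitness_sieve_h_primes : Int := (30)

def Spec_sieve_h_primes (limit : Int) (out : List Int) : Prop := out = sieve_h_primes_alt limit
instance (limit : Int) (out : List Int) : Decidable (Spec_sieve_h_primes limit out) := by
  unfold Spec_sieve_h_primes; infer_instance

-- ===== CLAIM (what is proved, stated in full; the proofs are below) =====
def Claim_equal_sieve_h_primes : Prop := ∀ (limit : Int), Dom_sieve_h_primes limit → Pre_sieve_h_primes limit → Spec_sieve_h_primes limit (sieve_h_primes limit)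
-- ===== LEMMAS AND PROOFS =====

lemma innerA_length (limit i : Int) (js : List Int) (arr : List Bool) :
    (innerA limit i js arr).length = arr.length := by
  induction js generalizing arr with
  | nil => rfl
  | cons j rest ih =>
      simp only [innerA]
      split_ifs with h1 h2
      · exact ih arr
      · rfl
      · rw [ih, PySem.List.length_pySetD]

lemma innerA_char (limit i : Int) (js : List Int) (arr : List Bool)
    (hi : 0 < i) (hj : ∀ j ∈ js, 0 < j ∧ i * j ≤ limit)
    (hlen : arr.length = (limit + 1).toNat) (m : Nat) :
    (PySem.List.pyGetD (innerA limit i js arr) (m : Int) false = true ↔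
      PySem.List.pyGetD arr (m : Int) false = true ∨
        ∃ j ∈ js, PySem.Int.mod j 4 = 1 ∧ (m : Int) = i * j) := by
  induction js generalizing arr with
  | nil => simp [innerA]
  | cons j rest ih =>
      obtain ⟨hj0, hjl⟩ := hj j (by simp)
      have hrest : ∀ x ∈ rest, 0 < x ∧ i * x ≤ limit := fun x hx => hj x (by simp [hx])
      simp only [innerA]
      split_ifs with h1 h2
      · rw [ih arr hrest hlen]
        constructor
        · rintro (h | ⟨x, hx, hx4, hm⟩)
          · exact Or.inl h
          · exact Or.inr ⟨x, by simp [hx], hx4, hm⟩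
        · rintro (h | ⟨x, hx, hx4, hm⟩)
          · exact Or.inl h
          · rcases List.mem_cons.mp hx with rfl | hx'
            · exact absurd hx4 h1
            · exact Or.inr ⟨x, hx', hx4, hm⟩
      · omega
      · simp only [not_not] at h1
        have hpos : 0 < i * j := mul_pos hi hj0
        have hn : (i * j) = (((i * j).toNat : Nat) : Int) := by omega
        have hlt : (i * j).toNat < arr.length := by omega
        rw [ih _ hrest (by rw [PySem.List.length_pySetD]; exact hlen)]
        rw [hn, PySem.List.pyGetD_pySetD_natCast arr _ m true false hlt]
        constructor
        · rintro (h | h)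
          · split_ifs at h with he
            · exact Or.inr ⟨j, by simp, h1, by omega⟩
            · exact Or.inl h
          · obtain ⟨x, hx, hx4, hm⟩ := h
            exact Or.inr ⟨x, by simp [hx], hx4, hm⟩
        · rintro (h | ⟨x, hx, hx4, hm⟩)
          · left; split_ifs with he
            · rfl
            · exact h
          · rcases List.mem_cons.mp hx with rfl | hx'
            · left; have : m = (i * x).toNat := by omega
              simp [this]
            · exact Or.inr ⟨x, hx', hx4, hm⟩

lemma outerA_char (limit : Int) (is' : List Int) (arr : List Bool)
    (his : ∀ i ∈ is', 0 < i)
    (hlen : arr.length = (limit + 1).toNat) (m : Nat) :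
    (PySem.List.pyGetD (outerA limit is' arr) (m : Int) false = true ↔
      PySem.List.pyGetD arr (m : Int) false = true ∨
        ∃ i ∈ is', PySem.Int.mod i 4 = 1 ∧
          ∃ j ∈ PySem.List.pyRange i (PySem.Int.floordiv limit i + 1) 1,
            PySem.Int.mod j 4 = 1 ∧ (m : Int) = i * j) := by
  induction is' generalizing arr with
  | nil => simp [outerA]
  | cons i rest ih =>
      have hrest : ∀ x ∈ rest, 0 < x := fun x hx => his x (by simp [hx])
      have hi : 0 < i := his i (by simp)
      simp only [outerA]
      split_ifs with h1
      · rw [ih arr hrest hlen]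
        simp only [List.exists_mem_cons_iff]
        tauto
      · simp only [not_not] at h1
        have hjs : ∀ j ∈ PySem.List.pyRange i (PySem.Int.floordiv limit i + 1) 1,
            0 < j ∧ i * j ≤ limit := by
          intro j hjm
          rw [PySem.List.mem_pyRange_one] at hjm
          refine ⟨by omega, ?_⟩
          have h2 : j ≤ PySem.Int.floordiv limit i := by omega
          have h3 := (PySem.Int.le_floordiv_iff_mul_le hi).mp h2
          rw [mul_comm]; exact h3
        rw [ih _ hrest (by rw [innerA_length]; exact hlen)]
        rw [innerA_char limit i _ arr hi hjs hlen m]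
        simp only [List.exists_mem_cons_iff]
        rw [or_assoc]
        have h1' : i % 4 = 1 := by
          rw [← PySem.Int.mod_eq_emod_of_pos (by norm_num : (0:Int) < 4)]; exact h1
        simp [h1']

lemma le_isqrtI (x a : Int) (hx : 0 ≤ x) (ha : 0 ≤ a) : x ≤ isqrtI a ↔ x * x ≤ a := by
  unfold isqrtI
  rcases Int.eq_ofNat_of_zero_le hx with ⟨p, rfl⟩
  rcases Int.eq_ofNat_of_zero_le ha with ⟨q, rfl⟩
  simp only [Int.toNat_natCast]
  exact_mod_cast Nat.le_sqrt

lemma isqrtI_mono {a b : Int} (h : a ≤ b) : isqrtI a ≤ isqrtI b := by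
  unfold isqrtI
  exact_mod_cast Nat.sqrt_le_sqrt (by omega : a.toNat ≤ b.toNat)

lemma mod4_cofactor (d j n : Int) (hn : n = d * j) (hd : d % 4 = 1) (h : n % 4 = 1) :
    j % 4 = 1 := by
  have hd' : d ≡ 1 [ZMOD 4] := by unfold Int.ModEq; omega
  have h2 : d * j ≡ 1 * j [ZMOD 4] := Int.ModEq.mul hd' Int.ModEq.rfl
  rw [one_mul, ← hn] at h2
  unfold Int.ModEq at h2
  omega

-- the number-theoretic core: A's "product of two H-numbers ≥ 5" witness for n being
-- H-composite ↔ B's "divisor d ≡ 1 (mod 4) with 5 ≤ d ≤ √n" witness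
lemma marked_iff (limit n : Int) (hn5 : 5 ≤ n) (hnl : n < limit + 1)
    (hn4 : n % 4 = 1) :
    ((∃ i ∈ PySem.List.pyRange 5 (isqrtI limit + 1) 1, PySem.Int.mod i 4 = 1 ∧
        ∃ j ∈ PySem.List.pyRange i (PySem.Int.floordiv limit i + 1) 1,
          PySem.Int.mod j 4 = 1 ∧ n = i * j) ↔
      ∃ d ∈ PySem.List.pyRange 5 (isqrtI n + 1) 4, PySem.Int.mod n d = 0) := by
  have h4 : (0:Int) < 4 := by norm_num
  constructor
  · rintro ⟨i, him, hi4, j, hjm, hj4, hne⟩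
    rw [PySem.List.mem_pyRange_one] at him hjm
    rw [PySem.Int.mod_eq_emod_of_pos h4] at hi4
    have hi0 : 0 < i := by omega
    refine ⟨i, ?_, ?_⟩
    · rw [PySem.List.mem_pyRange_iff_of_pos h4]
      have hii : i * i ≤ n := by
        rw [hne]; exact mul_le_mul_of_nonneg_left hjm.1 (le_of_lt hi0)
      have := (le_isqrtI i n (by omega) (by omega)).mpr hii
      exact ⟨by omega, by omega, by omega⟩
    · rw [PySem.Int.mod_eq_zero_iff_dvd]; exact ⟨j, hne⟩
  · rintro ⟨d, hdm, hdmod⟩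
    rw [PySem.List.mem_pyRange_iff_of_pos h4] at hdm
    obtain ⟨hd5, hdlt, hddvd⟩ := hdm
    have hd0 : 0 < d := by omega
    have hdvd : d ∣ n := (PySem.Int.mod_eq_zero_iff_dvd n d).mp hdmod
    have hnd : n = d * (n / d) := (Int.mul_ediv_cancel' hdvd).symm
    have hdd : d * d ≤ n := (le_isqrtI d n (by omega) (by omega)).mp (by omega)
    have hjge : d ≤ n / d := (Int.le_ediv_iff_mul_le hd0).mpr hdd
    have hj4 : n / d % 4 = 1 := mod4_cofactor d (n / d) n hnd (by omega) hn4
    have hjle : n / d ≤ PySem.Int.floordiv limit d :=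
      (PySem.Int.le_floordiv_iff_mul_le hd0).mpr (by rw [mul_comm, ← hnd]; omega)
    refine ⟨d, ?_, ?_, n / d, ?_, ?_, hnd⟩
    · rw [PySem.List.mem_pyRange_one]
      have := isqrtI_mono (by omega : n ≤ limit)
      exact ⟨by omega, by omega⟩
    · rw [PySem.Int.mod_eq_emod_of_pos h4]; omega
    · rw [PySem.List.mem_pyRange_one]; exact ⟨hjge, by omega⟩
    · rw [PySem.Int.mod_eq_emod_of_pos h4]; omega

-- ===== VERDICT (by name: the statement is the Claim_ definition above) =====
theorem sieve_h_primes_spec : Claim_equal_sieve_h_primes := by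
  intro limit _ hpre
  unfold Pre_sieve_h_primes at hpre
  unfold Spec_sieve_h_primes sieve_h_primes sieve_h_primes_alt
  apply PySem.List.foldl_congr_mem
  intro acc n hn
  rw [PySem.List.mem_pyRange_iff_of_pos (by norm_num : (0:Int) < 4)] at hn
  obtain ⟨hn5, hnl, hn4d⟩ := hn
  have hn4 : n % 4 = 1 := by omega
  have hcast : ((n.toNat : Nat) : Int) = n := by omega
  have his : ∀ i ∈ PySem.List.pyRange 5 (isqrtI limit + 1) 1, 0 < i := by
    intro i hi; rw [PySem.List.mem_pyRange_one] at hi; omega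
  have hchar := outerA_char limit (PySem.List.pyRange 5 (isqrtI limit + 1) 1)
      (List.replicate (limit + 1).toNat false) his (by simp) n.toNat
  rw [hcast] at hchar
  have hbase : PySem.List.pyGetD (List.replicate (limit + 1).toNat false) n false = false := by
    rw [← hcast, PySem.List.pyGetD_natCast]
    simp [List.getD]
  rw [hbase] at hchar
  simp only [Bool.false_eq_true, false_or] at hchar
  rw [marked_iff limit n hn5 hnl hn4] at hchar
  by_cases hb :
      (PySem.List.pyRange 5 (isqrtI n + 1) 4).all (fun d => PySem.Int.mod n d != 0) = true
  · have hnone : ¬ ∃ d ∈ PySem.List.pyRange 5 (isqrtI n + 1) 4, PySem.Int.mod n d = 0 := by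
      rw [List.all_eq_true] at hb
      rintro ⟨d, hd, hd0⟩
      exact absurd hd0 (by simpa using hb d hd)
    have hfalse : PySem.List.pyGetD (outerA limit
        (PySem.List.pyRange 5 (isqrtI limit + 1) 1)
        (List.replicate (limit + 1).toNat false)) n false = false := by
      rcases Bool.eq_false_or_eq_true (PySem.List.pyGetD (outerA limit
          (PySem.List.pyRange 5 (isqrtI limit + 1) 1)
          (List.replicate (limit + 1).toNat false)) n false) with h | h
      · exact absurd (hchar.mp h) hnone
      · exact h
    simp [hfalse, hb]
  · have hsome : ∃ d ∈ PySem.List.pyRange 5 (isqrtI n + 1) 4, PySem.Int.mod n d = 0 := by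
      rw [List.all_eq_true] at hb
      simp only [not_forall] at hb
      obtain ⟨d, hd, hd0⟩ := hb
      exact ⟨d, hd, by simpa using hd0⟩
    have htrue := hchar.mpr hsome
    simp [htrue, hb]
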